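-- pv_equiv track=rewrite | github.com/vshmyhlo/flambeau | flambeau/autograd.py | broadcast_shape_elementwise
-- ===== SOURCE A (Python) =====
-- def broadcast_shape_elementwise(a, b):
--     if a == b:
--         return a, (), ()
--     elif len(a) == 0:
--         return b, None, ()
--     elif len(b) == 0:
--         return (
--             a,
--             (),
--             None,
--         )
--     elif len(a) == len(b):
--         size, a_sum_dim, b_sum_dim = (), (), ()
--
--         for i, (a, b) in enumerate(zip(a, b)):
--             if a == b:
--                 size = (*size, a)
--             elif a == 1:
--                 size, a_sum_dim = (*size, b), (*a_sum_dim, i)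
--             elif b == 1:
--                 size, b_sum_dim = (*size, a), (*b_sum_dim, i)
--             else:
--                 raise Exception("Can't broadcast {} to {}".format(a, b))
--
--         return size, a_sum_dim, b_sum_dim
--
--     else:
--         raise Exception("Can't broadcast {} to {}".format(a, b))
-- ===== SOURCE B (Python) =====
-- def broadcast_shape_elementwise(a, b):
--     if a == b:
--         return a, (), ()
--     elif len(a) == 0:
--         return b, None, ()
--     elif len(b) == 0:
--         return a, (), None
--     elif len(a) != len(b):
--         raise Exception("Can't broadcast {} to {}".format(a, b))
--     pairs = list(zip(a, b))
--     for x, y in pairs: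
--         if x != y and x != 1 and y != 1:
--             raise Exception("Can't broadcast {} to {}".format(x, y))
--     size = tuple(y if x == 1 else x for x, y in pairs)
--     a_sum_dim = tuple(i for i, (x, y) in enumerate(pairs) if x == 1 and y != 1)
--     b_sum_dim = tuple(i for i, (x, y) in enumerate(pairs) if y == 1 and x != 1)
--     return size, a_sum_dim, b_sum_dim
-- ===== Notes on version B (the rewrite author's own statement) =====
-- stated objective: simpler
-- what changed: Replaces A's single stateful loop that threads three accumulators through a four-way branch with a separate validation pass followed by three independent comprehensions (size map and two filtered index lists).
import Mathlib
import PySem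

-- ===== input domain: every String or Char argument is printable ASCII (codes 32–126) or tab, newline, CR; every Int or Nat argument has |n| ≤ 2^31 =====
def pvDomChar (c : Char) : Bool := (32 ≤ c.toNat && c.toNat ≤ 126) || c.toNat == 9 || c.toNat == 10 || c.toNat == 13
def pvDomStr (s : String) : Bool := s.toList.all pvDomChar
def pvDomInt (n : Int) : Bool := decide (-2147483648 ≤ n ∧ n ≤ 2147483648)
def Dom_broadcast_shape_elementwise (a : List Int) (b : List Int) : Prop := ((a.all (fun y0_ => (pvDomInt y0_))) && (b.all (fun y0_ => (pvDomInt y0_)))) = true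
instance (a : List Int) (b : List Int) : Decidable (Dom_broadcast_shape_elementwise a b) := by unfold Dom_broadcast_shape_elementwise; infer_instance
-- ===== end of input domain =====

-- B replaces A's single stateful loop (three accumulators, four-way branch) with a
-- validation pass and three independent comprehensions; objective: simpler decomposition.

-- ===== PORT A =====
-- A's for-loop over enumerate(zip(a,b)) threading (size, a_sum_dim, b_sum_dim);
-- `none` models the `raise` in the final branch.
def bseLoopA : List (Int × (Int × Int)) → List Int → List Int → List Int → Option (List Int × List Int × List Int)
  | [], size, asd, bsd => some (size, asd, bsd)
  | (i, x, y) :: rest, size, asd, bsd =>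
    if x = y then bseLoopA rest (size ++ [x]) asd bsd
    else if x = 1 then bseLoopA rest (size ++ [y]) (asd ++ [i]) bsd
    else if y = 1 then bseLoopA rest (size ++ [x]) asd (bsd ++ [i])
    else none

def broadcast_shape_elementwise (a : List Int) (b : List Int) : List Int × Option (List Int) × Option (List Int) :=
  if a = b then (a, some [], some [])
  else if a.length = 0 then (b, none, some [])
  else if b.length = 0 then (a, some [], none)
  else if a.length = b.length then
    match bseLoopA (PySem.List.enumerate (a.zip b) 0) [] [] [] with
    | some (s, asd, bsd) => (s, some asd, some bsd)
    | none => ([], none, none)          -- raise: outside Pre_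
  else ([], none, none)                 -- raise: outside Pre_

-- ===== PORT B =====
def broadcast_shape_elementwise_alt (a : List Int) (b : List Int) : List Int × Option (List Int) × Option (List Int) :=
  if a = b then (a, some [], some [])
  else if a.length = 0 then (b, none, some [])
  else if b.length = 0 then (a, some [], none)
  else if a.length ≠ b.length then ([], none, none)   -- raise: outside Pre_
  else
    let ps := a.zip b
    if ps.all (fun p => decide (p.1 = p.2) || decide (p.1 = 1) || decide (p.2 = 1)) then
      (ps.map (fun p => if p.1 = 1 then p.2 else p.1),
       some ((PySem.List.enumerate ps 0).filterMap (fun e => if e.2.1 = 1 ∧ e.2.2 ≠ 1 then some e.1 else none)),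
       some ((PySem.List.enumerate ps 0).filterMap (fun e => if e.2.2 = 1 ∧ e.2.1 ≠ 1 then some e.1 else none)))
    else ([], none, none)               -- raise: outside Pre_

-- ===== PRECONDITION & SPEC =====
-- Pre_ excludes exactly the inputs on which Python A raises its Exception:
-- equal nonempty lengths with an aligned pair x≠y, x≠1, y≠1, or unequal nonzero lengths.
def Pre_broadcast_shape_elementwise (a : List Int) (b : List Int) : Prop :=
  a = b ∨ a.length = 0 ∨ b.length = 0 ∨
    (a.length = b.length ∧ ∀ p ∈ a.zip b, p.1 = p.2 ∨ p.1 = 1 ∨ p.2 = 1)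
instance (a : List Int) (b : List Int) : Decidable (Pre_broadcast_shape_elementwise a b) := by unfold Pre_broadcast_shape_elementwise; infer_instance

def pvWitness_broadcast_shape_elementwise : List Int × List Int := ([1, 2], [3, 2])

def Spec_broadcast_shape_elementwise (a : List Int) (b : List Int) (out : List Int × Option (List Int) × Option (List Int)) : Prop := out = broadcast_shape_elementwise_alt a b
instance (a : List Int) (b : List Int) (out : List Int × Option (List Int) × Option (List Int)) : Decidable (Spec_broadcast_shape_elementwise a b out) := by unfold Spec_broadcast_shape_elementwise; infer_instance

-- ===== CLAIM (what is proved, stated in full; the proofs are below) =====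
def Claim_equal_broadcast_shape_elementwise : Prop := ∀ (a : List Int) (b : List Int), Dom_broadcast_shape_elementwise a b → Pre_broadcast_shape_elementwise a b → Spec_broadcast_shape_elementwise a b (broadcast_shape_elementwise a b)

-- ===== LEMMAS AND PROOFS =====

-- A's loop, on an all-valid pair list, equals B's three comprehensions (appended to the accumulators).
theorem bseLoopA_eq_comprehensions (ps : List (Int × Int)) :
    ∀ (s : Int) (size asd bsd : List Int),
    (∀ p ∈ ps, p.1 = p.2 ∨ p.1 = 1 ∨ p.2 = 1) →
    bseLoopA (PySem.List.enumerate ps s) size asd bsd =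
      some (size ++ ps.map (fun p => if p.1 = 1 then p.2 else p.1),
            asd ++ (PySem.List.enumerate ps s).filterMap (fun e => if e.2.1 = 1 ∧ e.2.2 ≠ 1 then some e.1 else none),
            bsd ++ (PySem.List.enumerate ps s).filterMap (fun e => if e.2.2 = 1 ∧ e.2.1 ≠ 1 then some e.1 else none)) := by
  induction ps with
  | nil => intro s size asd bsd _; simp [PySem.List.enumerate, bseLoopA]
  | cons p rest ih =>
    intro s size asd bsd h
    obtain ⟨x, y⟩ := p
    have hrest : ∀ q ∈ rest, q.1 = q.2 ∨ q.1 = 1 ∨ q.2 = 1 := fun q hq => h q (List.mem_cons_of_mem _ hq)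
    have hp := h (x, y) List.mem_cons_self
    rw [PySem.List.enumerate_cons]
    by_cases hxy : x = y
    · subst hxy
      simp only [bseLoopA, if_pos rfl, List.filterMap_cons]
      rw [ih (s + 1) (size ++ [x]) asd bsd hrest]
      by_cases hx1 : x = 1 <;> simp [hx1]
    · by_cases hx1 : x = 1
      · simp only [bseLoopA, if_neg hxy, if_pos hx1, List.filterMap_cons]
        rw [ih (s + 1) (size ++ [y]) (asd ++ [s]) bsd hrest]
        have hy1 : y ≠ 1 := fun hy => hxy (hx1.trans hy.symm)
        simp [hx1, hy1]
      · have hy1 : y = 1 := by rcases hp with h | h | h <;> simp_all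
        subst hy1
        simp only [bseLoopA, if_neg hxy, if_neg hx1, List.filterMap_cons]
        rw [ih (s + 1) (size ++ [x]) asd (bsd ++ [s]) hrest]
        simp [hx1]

-- ===== VERDICT (by name: the statement is the Claim_ definition above) =====
theorem broadcast_shape_elementwise_spec : Claim_equal_broadcast_shape_elementwise := by
  intro a b _ hpre
  unfold Spec_broadcast_shape_elementwise broadcast_shape_elementwise broadcast_shape_elementwise_alt
  by_cases hab : a = b
  · simp [hab]
  · by_cases ha : a.length = 0
    · simp [hab, ha]
    · by_cases hb : b.length = 0
      · simp [hab, ha, hb]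
      · have hlen : a.length = b.length ∧ ∀ p ∈ a.zip b, p.1 = p.2 ∨ p.1 = 1 ∨ p.2 = 1 := by
          rcases hpre with h | h | h | h
          · exact absurd h hab
          · exact absurd h ha
          · exact absurd h hb
          · exact h
        have hall : (a.zip b).all (fun p => decide (p.1 = p.2) || decide (p.1 = 1) || decide (p.2 = 1)) = true := by
          rw [List.all_eq_true]
          intro p hp
          rcases hlen.2 p hp with h | h | h <;> simp [h]
        simp only [if_neg hab, if_neg ha, if_neg hb, if_pos hlen.1, if_neg (not_ne_iff.mpr hlen.1), hall]
        rw [bseLoopA_eq_comprehensions (a.zip b) 0 [] [] [] hlen.2]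
        simp
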